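-- pv_equiv track=rewrite | github.com/Xianzheng/teaching | K&J/20220620.py | check
-- ===== SOURCE A (Python) =====
-- def check(lst):
--     for eachRow in lst:
--         if eachRow != sorted(eachRow):
--             return False
--     for i in range(len(lst)):
--         newlst = []
--         for j in range(len(lst)):
--             newlst.append(lst[j][i])
--         if newlst != sorted(newlst):
--             return False
--     return True
-- ===== SOURCE B (Python) =====
-- def check(lst):
--     for row in lst:
--         for a, b in zip(row, row[1:]):
--             if a > b:
--                 return False
--     for r1, r2 in zip(lst, lst[1:]):
--         for a, b in zip(r1, r2):
--             if a > b:
--                 return False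
--     return True
-- ===== Notes on version B (the rewrite author's own statement) =====
-- stated objective: alternative
-- what changed: B checks monotonicity by scanning adjacent pairs (within each row, and between consecutive rows for the columns) instead of sorting every row and every materialised column and comparing with the sort.
-- outside the precondition, e.g. on check([[1, 2, 9], [1, 2, 3]]): A returns True, B returns False; on check([[1, 2], [1]]): A raises IndexError, B returns True
import Mathlib
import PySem

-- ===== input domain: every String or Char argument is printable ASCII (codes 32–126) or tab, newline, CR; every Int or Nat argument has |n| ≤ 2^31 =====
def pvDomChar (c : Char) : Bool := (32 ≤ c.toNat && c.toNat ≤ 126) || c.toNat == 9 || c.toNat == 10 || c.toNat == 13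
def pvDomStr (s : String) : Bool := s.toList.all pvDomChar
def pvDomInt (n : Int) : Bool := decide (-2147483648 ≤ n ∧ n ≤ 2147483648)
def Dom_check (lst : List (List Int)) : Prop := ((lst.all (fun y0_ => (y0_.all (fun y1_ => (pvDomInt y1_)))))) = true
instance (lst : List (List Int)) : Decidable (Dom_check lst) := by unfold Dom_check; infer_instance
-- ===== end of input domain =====

-- B replaces A's sort-and-compare of every row and every materialised column by an
-- adjacent-pair scan of rows and of consecutive row pairs (objective: alternative algorithm).


-- ===== PORT A =====
def check (lst : List (List Int)) : Bool :=
  -- first loop: early return False on an unsorted row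
  if lst.all (fun eachRow => eachRow == PySem.List.sorted eachRow (fun x => x) false) then
    -- second loop over i in range(len(lst)): build column i by appending lst[j][i], compare with its sort
    (PySem.List.pyRange 0 (lst.length : Int) 1).all (fun i =>
      let newlst := (PySem.List.pyRange 0 (lst.length : Int) 1).foldl
        (fun acc j => acc ++ [PySem.List.pyGetD (PySem.List.pyGetD lst j []) i 0]) []
      newlst == PySem.List.sorted newlst (fun x => x) false)
  else false

-- ===== PORT B =====
def check_alt (lst : List (List Int)) : Bool :=
  (lst.all (fun row => (row.zip row.tail).all (fun p => decide (p.1 ≤ p.2)))) &&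
  ((lst.zip lst.tail).all (fun rr => (rr.1.zip rr.2).all (fun p => decide (p.1 ≤ p.2))))

-- ===== PRECONDITION & SPEC =====
-- Pre_ excludes non-square inputs whose rows are all non-decreasing: A assumes a square matrix
-- (it indexes lst[j][i] for all i, j < len(lst)), so there it raises IndexError when some row is
-- shorter than len(lst), and when rows are longer it consults only the first len(lst) columns —
-- an accident of the square-matrix assumption; B naturally checks every overlapping column.
def Pre_check (lst : List (List Int)) : Prop :=
  (∃ row ∈ lst, ¬ row.Pairwise (· ≤ ·)) ∨ (∀ row ∈ lst, row.length = lst.length)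
instance (lst : List (List Int)) : Decidable (Pre_check lst) := by unfold Pre_check; infer_instance

def pvWitness_check : List (List Int) := [[1, 2], [1, 3]]

def Spec_check (lst : List (List Int)) (out : Bool) : Prop := out = check_alt lst
instance (lst : List (List Int)) (out : Bool) : Decidable (Spec_check lst out) := by unfold Spec_check; infer_instance

-- ===== CLAIM (what is proved, stated in full; the proofs are below) =====
def Claim_equal_check : Prop := ∀ (lst : List (List Int)), Dom_check lst → Pre_check lst → Spec_check lst (check lst)

-- ===== LEMMAS AND PROOFS =====

-- row == sorted(row) is exactly Pairwise (· ≤ ·)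
theorem eq_sorted_iff_pairwise (row : List Int) :
    (row == PySem.List.sorted row (fun x => x) false) = true ↔ row.Pairwise (· ≤ ·) := by
  rw [beq_iff_eq]
  constructor
  · intro h
    have := PySem.List.sorted_pairwise row (fun x => x) (κ := Int)
    rw [← h] at this
    simpa using this
  · intro h
    exact (PySem.List.sorted_eq_self_of_pairwise row (fun x => x) (by simpa using h)).symm

-- the adjacent-pair scan of B is the chain of adjacent inequalities
theorem zip_tail_all_iff_isChain (l : List Int) :
    ((l.zip l.tail).all (fun p => decide (p.1 ≤ p.2))) = true ↔ l.IsChain (· ≤ ·) := by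
  induction l with
  | nil => simp
  | cons a t ih =>
    cases t with
    | nil => simp
    | cons b u =>
      simp only [List.tail_cons, List.zip_cons_cons, List.all_cons, Bool.and_eq_true,
        decide_eq_true_eq, List.isChain_cons_cons]
      exact and_congr Iff.rfl ih

-- adjacent inequalities propagate to all pairs
theorem mono_of_adjacent (f : Nat → Int) (n : Nat) (h : ∀ j, j + 1 < n → f j ≤ f (j+1)) :
    ∀ p q, p < q → q < n → f p ≤ f q := by
  intro p q hpq hqn
  induction q with
  | zero => omega
  | succ m ih =>
    rcases Nat.lt_succ_iff_lt_or_eq.mp hpq with h' | h'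
    · exact le_trans (ih h' (by omega)) (h m hqn)
    · subst h'
      exact h p hqn

-- ===== VERDICT (by name: the statement is the Claim_ definition above) =====
theorem check_spec : Claim_equal_check := by
  intro lst _ hpre
  unfold Spec_check check check_alt
  by_cases hrows : (lst.all (fun r => r == PySem.List.sorted r (fun x => x) false)) = true
  · -- all rows sorted
    have hrowsP : ∀ r ∈ lst, r.Pairwise (· ≤ ·) := by
      intro r hr
      exact (eq_sorted_iff_pairwise r).mp (by simpa using (List.all_eq_true.mp hrows r hr))
    have hrowsB : (lst.all (fun row => (row.zip row.tail).all (fun p => decide (p.1 ≤ p.2)))) = true := by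
      refine List.all_eq_true.mpr (fun r hr => ?_)
      simpa using (zip_tail_all_iff_isChain r).mpr ((List.isChain_iff_pairwise).mpr (hrowsP r hr))
    have hsq : ∀ row ∈ lst, row.length = lst.length := by
      rcases hpre with h | h
      · rcases h with ⟨r, hr, hnp⟩
        exact absurd (hrowsP r hr) hnp
      · exact h
    rw [if_pos hrows, hrowsB, Bool.true_and]
    -- both sides are now the column checks; compare via Prop
    rw [Bool.eq_iff_iff]
    -- rewrite A's fold into a map over the rows
    have hcol : ∀ i : Int,
        ((PySem.List.pyRange 0 (lst.length : Int) 1).foldl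
          (fun acc j => acc ++ [PySem.List.pyGetD (PySem.List.pyGetD lst j []) i 0]) [])
        = lst.map (fun row => PySem.List.pyGetD row i 0) := by
      intro i
      rw [show ((lst.length : Int)) = PySem.List.len lst from rfl,
        PySem.List.foldl_pyRange_zero_pyGetD lst ([] : List Int)
        (fun acc row => acc ++ [PySem.List.pyGetD row i 0]) []]
      simpa using PySem.List.foldl_append_singleton_eq_map
        (fun row => PySem.List.pyGetD row i 0) lst []
    constructor
    · -- A's column check → B's adjacent-rows check
      intro hA
      refine List.all_eq_true.mpr (fun rr hrr => ?_)
      -- rr is an adjacent pair of rows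
      obtain ⟨j, hj, hget⟩ := List.mem_iff_getElem.mp hrr
      have hjlen : j < lst.length - 1 := by
        have := hj; simpa [List.length_zip, List.length_tail] using this
      have hpair : rr = (lst[j]'(by omega), lst[j+1]'(by omega)) := by
        rw [← hget, List.getElem_zip]
        exact Prod.ext rfl (List.getElem_tail _)
      subst hpair
      refine List.all_eq_true.mpr (fun p hp => ?_)
      obtain ⟨k, hk, hpk⟩ := List.mem_iff_getElem.mp hp
      have hk' : k < (lst[j]'(by omega)).length ∧ k < (lst[j+1]'(by omega)).length := by
        simpa [List.length_zip, lt_min_iff] using hk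
      have hkn : k < lst.length := by
        have := hsq (lst[j]'(by omega)) (List.getElem_mem _)
        omega
      -- instantiate A's check at column k
      have hAi := List.all_eq_true.mp hA ((k : Int)) (by
        rw [PySem.List.mem_pyRange_one]; constructor <;> [positivity; exact_mod_cast hkn])
      simp only [hcol] at hAi
      have hPW : (lst.map (fun row => PySem.List.pyGetD row (k : Int) 0)).Pairwise (· ≤ ·) :=
        (eq_sorted_iff_pairwise _).mp hAi
      rw [List.pairwise_map] at hPW
      have hle := (List.pairwise_iff_getElem.mp hPW) j (j+1) (by omega) (by omega) (by omega)
      rw [← hpk, List.getElem_zip]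
      simp only [decide_eq_true_eq]
      rw [PySem.List.pyGetD_natCast, PySem.List.pyGetD_natCast,
        List.getD_eq_getElem _ _ (by exact hk'.1), List.getD_eq_getElem _ _ (by exact hk'.2)] at hle
      exact hle
    · -- B's adjacent-rows check → A's column check
      intro hB
      refine List.all_eq_true.mpr (fun i hi => ?_)
      obtain ⟨hi0, hin⟩ := PySem.List.mem_pyRange_one.mp hi
      simp only [hcol]
      refine (eq_sorted_iff_pairwise _).mpr ?_
      rw [List.pairwise_map, List.pairwise_iff_getElem]
      intro p q hp hq hpq
      have hadj : ∀ j, j + 1 < lst.length →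
          (fun m => PySem.List.pyGetD (lst.getD m []) i 0) j ≤
          (fun m => PySem.List.pyGetD (lst.getD m []) i 0) (j+1) := by
        intro j hj
        have hB' := List.all_eq_true.mp hB
          ((lst[j]'(by omega), lst[j+1]'(by omega)) : List Int × List Int) (by
            refine List.mem_iff_getElem.mpr ⟨j, by
              simp only [List.length_zip, List.length_tail]; omega, ?_⟩
            rw [List.getElem_zip]
            exact Prod.ext rfl (List.getElem_tail _))
        have hk1 : i.toNat < (lst[j]'(by omega)).length := by
          rw [hsq _ (List.getElem_mem _)]; omega
        have hk2 : i.toNat < (lst[j+1]'(by omega)).length := by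
          rw [hsq _ (List.getElem_mem _)]; omega
        have hmem : ((lst[j]'(by omega))[i.toNat]'hk1, (lst[j+1]'(by omega))[i.toNat]'hk2)
            ∈ (lst[j]'(by omega)).zip (lst[j+1]'(by omega)) := by
          refine List.mem_iff_getElem.mpr ⟨i.toNat, by
            simp only [List.length_zip, lt_min_iff]; exact ⟨hk1, hk2⟩, ?_⟩
          exact List.getElem_zip ..
        have hle := List.all_eq_true.mp hB' _ hmem
        simp only [decide_eq_true_eq] at hle
        show PySem.List.pyGetD (lst.getD j []) i 0 ≤ PySem.List.pyGetD (lst.getD (j+1) []) i 0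
        rw [List.getD_eq_getElem lst [] (show j < lst.length by omega),
          List.getD_eq_getElem lst [] hj,
          PySem.List.pyGetD_eq_getElem (lst[j]'(by omega)) 0 hi0 (by omega),
          PySem.List.pyGetD_eq_getElem (lst[j+1]'(by omega)) 0 hi0 (by omega)]
        exact hle
      have := mono_of_adjacent (fun m => PySem.List.pyGetD (lst.getD m []) i 0)
        lst.length hadj p q hpq hq
      simpa [List.getD_eq_getElem lst [] hp, List.getD_eq_getElem lst [] hq,
        List.getElem?_eq_getElem hp, List.getElem?_eq_getElem hq] using this
  · -- some row unsorted: both sides are false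
    rw [if_neg hrows]
    have : (lst.all (fun row => (row.zip row.tail).all (fun p => decide (p.1 ≤ p.2)))) = false := by
      rw [Bool.eq_false_iff]
      intro hall
      exact hrows (List.all_eq_true.mpr (fun r hr =>
        (eq_sorted_iff_pairwise r).mpr (List.isChain_iff_pairwise.mp
          ((zip_tail_all_iff_isChain r).mp (by simpa using List.all_eq_true.mp hall r hr)))))
    rw [this, Bool.false_and]
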